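-- pv_equiv track=rewrite | github.com/leadlea/asd | scripts/build_cejc_nanami_compare_windows_html.py | detect_text_col
-- ===== SOURCE A (Python) =====
-- def detect_text_col(cols):
--     # よくある候補
--     cand = ["text", "transcription", "utterance", "orth", "kana", "surface", "content"]
--     for c in cand:
--         if c in cols:
--             return c
--     # “文字列っぽい列”を自動推定（時間列/ID列は除外）
--     bad = set(["start","end","xmin","xmax","tmin","tmax","begin","finish","duration","tier","speaker","spk","id","index","conv_id","conversation_id"])
--     best=None
--     best_score=-1
--     for c in cols:
--         if c in bad:
--             continue
--         lc=c.lower()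
--         if any(k in lc for k in ["time","sec","dur","start","end","xmin","xmax","tmin","tmax","idx","id"]):
--             continue
--         # “txt” “trans” “orth” が入ってたら加点
--         score = 0
--         if any(k in lc for k in ["text","trans","orth","utt","sentence","content"]):
--             score += 3
--         best = c if score > best_score else best
--         best_score = max(best_score, score)
--     return best
-- ===== SOURCE B (Python) =====
-- BAD = {"start","end","xmin","xmax","tmin","tmax","begin","finish","duration","tier","speaker","spk","id","index","conv_id","conversation_id"}
-- TIMEISH = ["time","sec","dur","start","end","xmin","xmax","tmin","tmax","idx","id"]
-- KEYS = ["text","trans","orth","utt","sentence","content"]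
--
-- def _eligible(c):
--     if c in BAD:
--         return False
--     lc = c.lower()
--     return not any(k in lc for k in TIMEISH)
--
-- def _has_key(c):
--     lc = c.lower()
--     return any(k in lc for k in KEYS)
--
-- def detect_text_col(cols):
--     cand = ["text", "transcription", "utterance", "orth", "kana", "surface", "content"]
--     for c in cand:
--         if c in cols:
--             return c
--     eligible = [c for c in cols if _eligible(c)]
--     for c in eligible:
--         if _has_key(c):
--             return c
--     return eligible[0] if eligible else None
-- ===== Notes on version B (the rewrite author's own statement) =====
-- stated objective: simpler
-- what changed: Replaces the running best/best_score argmax fold (scores only ever 0 or 3) by an explicit two-pass first-match: first eligible column containing a text-ish keyword, else the first eligible column.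
import Mathlib
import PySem

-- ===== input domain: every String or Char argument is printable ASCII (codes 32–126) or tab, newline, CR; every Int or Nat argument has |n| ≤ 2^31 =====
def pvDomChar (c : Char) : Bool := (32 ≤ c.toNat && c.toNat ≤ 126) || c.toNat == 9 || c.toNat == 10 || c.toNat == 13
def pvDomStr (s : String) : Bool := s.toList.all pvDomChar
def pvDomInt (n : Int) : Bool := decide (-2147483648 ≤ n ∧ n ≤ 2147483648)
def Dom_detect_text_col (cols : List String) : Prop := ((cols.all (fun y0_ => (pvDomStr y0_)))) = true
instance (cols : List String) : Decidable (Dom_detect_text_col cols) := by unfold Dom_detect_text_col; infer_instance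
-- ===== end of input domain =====

-- B replaces A's running best/best_score argmax fold (scores are only 0 or 3) by two explicit
-- first-match passes: first eligible keyword column, else first eligible column. Objective: simpler.


-- ===== PORT A =====
def pvCand : List String := ["text", "transcription", "utterance", "orth", "kana", "surface", "content"]
def pvBad : List String := ["start","end","xmin","xmax","tmin","tmax","begin","finish","duration","tier","speaker","spk","id","index","conv_id","conversation_id"]
def pvTimeish : List String := ["time","sec","dur","start","end","xmin","xmax","tmin","tmax","idx","id"]
def pvKeys : List String := ["text","trans","orth","utt","sentence","content"]

-- A's heuristic loop: carries (best, best_score) exactly as the Python does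
def pvLoopA : List String → Option String → Int → Option String
  | [], best, _ => best
  | c :: rest, best, bs =>
    if pvBad.contains c then pvLoopA rest best bs
    else
      let lc := PySem.Str.lower c
      if pvTimeish.any (fun k => PySem.Str.isIn k lc) then pvLoopA rest best bs
      else
        let score : Int := if pvKeys.any (fun k => PySem.Str.isIn k lc) then 3 else 0
        pvLoopA rest (if score > bs then some c else best) (max bs score)

def detect_text_col (cols : List String) : Option String :=
  match pvCand.find? (fun c => cols.contains c) with
  | some c => some c
  | none => pvLoopA cols none (-1)

-- ===== PORT B =====
def pvElig (c : String) : Bool :=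
  if pvBad.contains c then false
  else
    let lc := PySem.Str.lower c
    !pvTimeish.any (fun k => PySem.Str.isIn k lc)
def pvHasKey (c : String) : Bool :=
  let lc := PySem.Str.lower c
  pvKeys.any (fun k => PySem.Str.isIn k lc)

def detect_text_col_alt (cols : List String) : Option String :=
  match pvCand.find? (fun c => cols.contains c) with
  | some c => some c
  | none =>
    let eligible := cols.filter pvElig
    match eligible.find? pvHasKey with
    | some c => some c
    | none => eligible.head?

-- ===== PRECONDITION & SPEC =====
def Spec_detect_text_col (cols : List String) (out : Option String) : Prop := out = detect_text_col_alt cols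
instance (cols : List String) (out : Option String) : Decidable (Spec_detect_text_col cols out) := by unfold Spec_detect_text_col; infer_instance

-- ===== CLAIM (what is proved, stated in full; the proofs are below) =====
def Claim_equal_detect_text_col : Prop := ∀ (cols : List String), Dom_detect_text_col cols → Spec_detect_text_col cols (detect_text_col cols)

-- ===== LEMMAS AND PROOFS =====

-- once best_score = 3 the loop never changes best (score ≤ 3, comparison strict)
theorem pvLoopA_three (cols : List String) (b : Option String) :
    pvLoopA cols b 3 = b := by
  induction cols generalizing b with
  | nil => rfl
  | cons c rest ih =>
    simp only [pvLoopA]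
    split_ifs <;> first | omega | simp [ih]

-- from state (some b, 0): first eligible keyword column, else b
theorem pvLoopA_zero (cols : List String) (b : String) :
    pvLoopA cols (some b) 0 =
      match (cols.filter pvElig).find? pvHasKey with
      | some c => some c
      | none => some b := by
  induction cols generalizing b with
  | nil => rfl
  | cons c rest ih =>
    simp only [pvLoopA, List.filter_cons]
    by_cases hbad : pvBad.contains c = true
    · have hel : pvElig c = false := by unfold pvElig; rw [if_pos hbad]
      rw [if_pos hbad, hel, if_neg (by simp)]
      exact ih b
    · have hbad' := Bool.eq_false_iff.mpr hbad
      rw [if_neg hbad]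
      by_cases ht : pvTimeish.any (fun k => PySem.Str.isIn k (PySem.Str.lower c)) = true
      · have hel : pvElig c = false := by
          unfold pvElig
          rw [if_neg hbad]
          show (!(pvTimeish.any fun k => PySem.Str.isIn k (PySem.Str.lower c))) = false
          rw [ht]; rfl
        rw [if_pos ht, hel, if_neg (by simp)]
        exact ih b
      · have hel : pvElig c = true := by
          unfold pvElig
          rw [if_neg hbad]
          show (!(pvTimeish.any fun k => PySem.Str.isIn k (PySem.Str.lower c))) = true
          rw [Bool.eq_false_iff.mpr ht]; rfl
        rw [if_neg ht, hel, if_pos rfl]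
        by_cases hk : pvKeys.any (fun k => PySem.Str.isIn k (PySem.Str.lower c)) = true
        · have hkey : pvHasKey c = true := hk
          rw [if_pos hk, List.find?_cons_of_pos hkey, if_pos (by norm_num)]
          have : max (0 : Int) 3 = 3 := by norm_num
          rw [this, pvLoopA_three]
        · have hkey : pvHasKey c = false := Bool.eq_false_iff.mpr hk
          rw [if_neg hk, List.find?_cons_of_neg (by simp [hkey]), if_neg (by norm_num)]
          have : max (0 : Int) 0 = 0 := by norm_num
          rw [this]
          exact ih b

-- from the initial state (None, -1): B's two-pass result
theorem pvLoopA_init (cols : List String) :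
    pvLoopA cols none (-1) =
      match (cols.filter pvElig).find? pvHasKey with
      | some c => some c
      | none => (cols.filter pvElig).head? := by
  induction cols with
  | nil => rfl
  | cons c rest ih =>
    simp only [pvLoopA, List.filter_cons]
    by_cases hbad : pvBad.contains c = true
    · have hel : pvElig c = false := by unfold pvElig; rw [if_pos hbad]
      rw [if_pos hbad, hel, if_neg (by simp)]
      exact ih
    · have hbad' := Bool.eq_false_iff.mpr hbad
      rw [if_neg hbad]
      by_cases ht : pvTimeish.any (fun k => PySem.Str.isIn k (PySem.Str.lower c)) = true
      · have hel : pvElig c = false := by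
          unfold pvElig
          rw [if_neg hbad]
          show (!(pvTimeish.any fun k => PySem.Str.isIn k (PySem.Str.lower c))) = false
          rw [ht]; rfl
        rw [if_pos ht, hel, if_neg (by simp)]
        exact ih
      · have hel : pvElig c = true := by
          unfold pvElig
          rw [if_neg hbad]
          show (!(pvTimeish.any fun k => PySem.Str.isIn k (PySem.Str.lower c))) = true
          rw [Bool.eq_false_iff.mpr ht]; rfl
        rw [if_neg ht, hel, if_pos rfl]
        by_cases hk : pvKeys.any (fun k => PySem.Str.isIn k (PySem.Str.lower c)) = true
        · have hkey : pvHasKey c = true := hk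
          rw [if_pos hk, List.find?_cons_of_pos hkey, if_pos (by norm_num)]
          have : max (-1 : Int) 3 = 3 := by norm_num
          rw [this, pvLoopA_three]
        · have hkey : pvHasKey c = false := Bool.eq_false_iff.mpr hk
          rw [if_neg hk, List.find?_cons_of_neg (by simp [hkey]), if_pos (by norm_num)]
          have : max (-1 : Int) 0 = 0 := by norm_num
          rw [this, pvLoopA_zero]
          cases (rest.filter pvElig).find? pvHasKey <;> simp

-- ===== VERDICT (by name: the statement is the Claim_ definition above) =====
theorem detect_text_col_spec : Claim_equal_detect_text_col := by
  intro cols _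
  unfold Spec_detect_text_col detect_text_col detect_text_col_alt
  cases h : pvCand.find? (fun c => cols.contains c) with
  | some c => rfl
  | none => simpa using pvLoopA_init cols
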